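-- pv_equiv track=rewrite | github.com/josondev/ideal-invention | oppe1 mock13.py | exactly_two
-- ===== SOURCE A (Python) =====
-- def exactly_two(players):
--     l=[];final=[]
--     for name in players:
--         count=0
--         for sport in players[name]:
--             if(players[name][sport]==True):
--                 count+=1
--         l.append([name,count])
--     #return(l)
--     for i in range(len(l)):
--         if(l[i][1]==2):
--             final.append(l[i][0])
--     return(set(final))
-- ===== SOURCE B (Python) =====
-- def exactly_two(players):
--     result = set()
--     for name in players:
--         trues = (1 for v in players[name].values() if v == True)
--         if next(trues, None) is not None and next(trues, None) is not None \
--                 and next(trues, None) is None: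
--             result.add(name)
--     return result
-- ===== Notes on version B (the rewrite author's own statement) =====
-- stated objective: alternative
-- what changed: Instead of A's build-a-[name,count]-list then index-filter, B never counts: per player it consumes a lazy iterator of True values and tests 'exactly two' by three short-circuit next() probes (first two must exist, third must not), adding the name to the set in the same pass.
import Mathlib
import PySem

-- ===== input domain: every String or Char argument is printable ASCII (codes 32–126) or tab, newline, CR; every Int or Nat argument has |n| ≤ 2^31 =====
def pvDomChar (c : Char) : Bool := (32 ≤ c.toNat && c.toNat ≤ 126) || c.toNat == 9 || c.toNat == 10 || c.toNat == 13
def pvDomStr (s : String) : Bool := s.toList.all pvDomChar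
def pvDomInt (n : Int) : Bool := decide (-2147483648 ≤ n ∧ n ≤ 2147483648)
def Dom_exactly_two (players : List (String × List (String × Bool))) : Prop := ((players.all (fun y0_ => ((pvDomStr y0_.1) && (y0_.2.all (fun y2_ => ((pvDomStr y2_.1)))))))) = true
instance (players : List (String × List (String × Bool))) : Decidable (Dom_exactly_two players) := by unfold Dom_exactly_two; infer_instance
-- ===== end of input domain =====

-- B replaces A's count-then-filter (build [name,count] list, then index-scan for count==2) by a
-- countless single pass: per player three short-circuit next() probes on an iterator of True values.

-- ===== PORT A =====
-- A's inner loop: for sport in players[name]: if players[name][sport]==True: count+=1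
def pvCountA (inner : PySem.Dict String Bool) : Int :=
  inner.keys.foldl (fun count sport => if inner.getD sport false = true then count + 1 else count) 0

def exactly_two (players : List (String × List (String × Bool))) : List String :=
  let d := PySem.Dict.ofList players
  let l : List (String × Int) :=
    d.keys.foldl (fun acc name => acc ++ [(name, pvCountA (PySem.Dict.ofList (d.getD name [])))]) []
  let final : List String :=
    (PySem.List.pyRange 0 (l.length : Int) 1).foldl
      (fun acc i => if (PySem.List.pyGetD l i ("", 0)).2 = 2 then acc ++ [(PySem.List.pyGetD l i ("", 0)).1] else acc) []
  PySem.Set.ofList final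

-- ===== PORT B =====
-- next() on the iterator '(1 for v in vals if v == True)': returns the unconsumed suffix after the
-- first True, or none when the iterator is exhausted.
def pvNextTrue? : List Bool → Option (List Bool)
  | [] => none
  | v :: vs => if v = true then some vs else pvNextTrue? vs

-- the three-probe short-circuit test: two next() succeed, the third is exhausted
def pvThreeProbes (vals : List Bool) : Bool :=
  match pvNextTrue? vals with
  | none => false
  | some r1 =>
    match pvNextTrue? r1 with
    | none => false
    | some r2 => (pvNextTrue? r2).isNone

def exactly_two_alt (players : List (String × List (String × Bool))) : List String :=
  (PySem.Dict.ofList players).keys.foldl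
    (fun result name =>
      if pvThreeProbes (PySem.Dict.ofList ((PySem.Dict.ofList players).getD name [])).values
      then PySem.Set.add result name else result)
    PySem.Set.empty

-- ===== PRECONDITION & SPEC =====
def Spec_exactly_two (players : List (String × List (String × Bool))) (out : List String) : Prop := out = exactly_two_alt players
instance (players : List (String × List (String × Bool))) (out : List String) : Decidable (Spec_exactly_two players out) := by unfold Spec_exactly_two; infer_instance

-- ===== CLAIM (what is proved, stated in full; the proofs are below) =====
def Claim_equal_exactly_two : Prop := ∀ (players : List (String × List (String × Bool))), Dom_exactly_two players → Spec_exactly_two players (exactly_two players)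

-- ===== LEMMAS AND PROOFS =====

-- pvNextTrue? consumes exactly one True
theorem pvNextTrue?_none (vals : List Bool) :
    pvNextTrue? vals = none ↔ vals.count true = 0 := by
  induction vals with
  | nil => simp [pvNextTrue?]
  | cons v vs ih => cases v <;> simp [pvNextTrue?, ih]

theorem pvNextTrue?_some (vals r : List Bool) (h : pvNextTrue? vals = some r) :
    vals.count true = r.count true + 1 := by
  induction vals with
  | nil => simp [pvNextTrue?] at h
  | cons v vs ih =>
    cases v with
    | false => simp [pvNextTrue?] at h; simpa using ih h
    | true => simp [pvNextTrue?] at h; subst h; simp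

-- the three-probe test is 'exactly two Trues'
theorem pvThreeProbes_iff (vals : List Bool) :
    pvThreeProbes vals = true ↔ vals.count true = 2 := by
  unfold pvThreeProbes
  rcases h1 : pvNextTrue? vals with _ | r1
  · have h0 := (pvNextTrue?_none vals).mp h1
    simp [h0]
  · have e1 := pvNextTrue?_some _ _ h1
    rcases h2 : pvNextTrue? r1 with _ | r2
    · have h0 := (pvNextTrue?_none r1).mp h2
      simp [h2, e1, h0]
    · have e2 := pvNextTrue?_some _ _ h2
      simp [h2, Option.isNone_iff_eq_none, pvNextTrue?_none, e1, e2]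

-- A's key-lookup counting loop computes the number of True values (keys of a Dict are Nodup)
theorem pvCountA_eq_count (inner : PySem.Dict String Bool) (h : inner.keys.Nodup) :
    pvCountA inner = (inner.values.count true : Int) := by
  unfold pvCountA
  rw [PySem.Dict.values_eq_map_keys inner h false]
  generalize inner.keys = ks
  induction ks using List.reverseRecOn with
  | nil => simp
  | append_singleton xs x ih =>
    by_cases hx : inner.getD x false = true <;> simp [hx, ih]

-- conditional Set.add loop = update with the filtered elements
theorem foldl_add_if_filter {α : Type} [BEq α] [LawfulBEq α] (L : List α) (P : α → Prop)
    [DecidablePred P] (s : PySem.Set α) :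
    L.foldl (fun s x => if P x then PySem.Set.add s x else s) s
      = PySem.Set.update s (L.filter (fun x => decide (P x))) := by
  induction L generalizing s with
  | nil => simp [PySem.Set.update]
  | cons x xs ih =>
    by_cases hx : P x
    · simp [hx, ih, PySem.Set.update_cons]
    · simp [hx, ih]

theorem exactly_two_eq_alt (players : List (String × List (String × Bool))) :
    exactly_two players = exactly_two_alt players := by
  unfold exactly_two exactly_two_alt
  dsimp only
  set d := PySem.Dict.ofList players with hd
  have hnd : d.keys.Nodup := PySem.Dict.nodup_keys_ofList players
  -- A's first loop builds a map over keys
  rw [PySem.List.foldl_append_singleton_eq_map]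
  simp only [List.nil_append]
  -- A's index loop is a fold over the built list itself
  rw [PySem.List.foldl_pyRange_zero_pyGetD' (d.keys.map (fun name => (name, pvCountA (PySem.Dict.ofList (d.getD name []))))) ("", 0) (fun acc x => if x.2 = 2 then acc ++ [x.1] else acc) []]
  -- A's filter-append loop = filter then map
  have hA : ∀ (L : List (String × Int)) (acc : List String),
      L.foldl (fun acc p => if p.2 = 2 then acc ++ [p.1] else acc) acc
        = acc ++ (L.filter (fun p => p.2 = 2)).map (·.1) := by
    intro L
    induction L with
    | nil => simp
    | cons x xs ih => intro acc; by_cases hx : x.2 = 2 <;> simp [hx, ih]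
  rw [hA]
  -- B's conditional add loop = update of the filtered keys
  rw [foldl_add_if_filter d.keys (fun name => pvThreeProbes (PySem.Dict.ofList (d.getD name [])).values = true) PySem.Set.empty]
  simp only [List.nil_append, List.filter_map, List.map_map, Function.comp_def]
  -- the two per-player conditions agree
  have hP : ∀ k ∈ d.keys,
      decide (pvCountA (PySem.Dict.ofList (d.getD k [])) = 2)
        = decide (pvThreeProbes (PySem.Dict.ofList (d.getD k [])).values = true) := by
    intro k _
    have hc := pvCountA_eq_count (PySem.Dict.ofList (d.getD k [])) (PySem.Dict.nodup_keys_ofList _)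
    have hp := pvThreeProbes_iff (PySem.Dict.ofList (d.getD k [])).values
    simp only [decide_eq_decide]
    rw [hc, hp]
    exact_mod_cast Iff.rfl.symm
  rw [List.filter_congr hP]
  simp [pysem, PySem.Set.empty]

-- ===== VERDICT (by name: the statement is the Claim_ definition above) =====
theorem exactly_two_spec : Claim_equal_exactly_two := by
  intro players _; exact exactly_two_eq_alt players
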